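-- pv_equiv track=rewrite | github.com/Pietro2501/AlphaTeam | BioTools/tools.py | hard_trimming
-- ===== SOURCE A (Python) =====
-- def hard_trimming(sequence:str, qualList: list[int], qs: int, len_s:int):
--     """
--     Ad un certo punto mettiamo la documentazione
--     """
--     # filter(lambda x,qs: x < qs, qualList)
--     l = [x for x in qualList if x < qs]
--     if l:
--         i = qualList.index(l[0])
--         qualList = qualList[:i]
--         sequence = sequence[:i]
--     if len(sequence) < len_s:
--         sequence, qualList = None, None
--     return sequence, qualList
-- ===== SOURCE B (Python) =====
-- def hard_trimming(sequence, qualList, qs, len_s):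
--     kept = []
--     trimmed = False
--     for q in qualList:
--         if q < qs:
--             trimmed = True
--             break
--         kept.append(q)
--     if trimmed:
--         sequence = sequence[:len(kept)]
--         qualList = kept
--     if len(sequence) < len_s:
--         return None, None
--     return sequence, qualList
-- ===== Notes on version B (the rewrite author's own statement) =====
-- stated objective: simpler
-- what changed: Replaces A's two staged passes (build the full filtered list of bad qualities, then re-scan with .index to locate the first one, then slice the quality list) by a single accumulator loop that builds the kept quality prefix directly and breaks at the first bad base, so no index search over and no slice of qualList is performed.
import Mathlib
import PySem

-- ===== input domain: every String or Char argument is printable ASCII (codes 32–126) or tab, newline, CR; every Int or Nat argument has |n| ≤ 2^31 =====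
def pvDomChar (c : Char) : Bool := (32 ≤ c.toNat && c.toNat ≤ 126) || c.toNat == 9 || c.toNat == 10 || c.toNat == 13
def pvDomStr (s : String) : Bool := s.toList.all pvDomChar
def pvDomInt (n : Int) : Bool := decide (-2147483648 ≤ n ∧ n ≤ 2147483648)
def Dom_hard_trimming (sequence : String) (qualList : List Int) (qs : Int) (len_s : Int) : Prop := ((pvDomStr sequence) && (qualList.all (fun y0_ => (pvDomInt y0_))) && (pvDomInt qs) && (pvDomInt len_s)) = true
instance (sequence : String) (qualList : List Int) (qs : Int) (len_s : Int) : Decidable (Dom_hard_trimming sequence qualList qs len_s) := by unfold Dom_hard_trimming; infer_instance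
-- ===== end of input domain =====

-- B builds the kept quality prefix in one accumulator loop that breaks at the first bad base,
-- instead of A's staged passes (filter the bad qualities, .index-rescan for the first, slice): simpler decomposition.

-- ===== PORT A =====
-- A: l = [x for x in qualList if x < qs]; if l: i = qualList.index(l[0]); slice both; final length guard.
-- l[0] exists in the nonempty branch; .index cannot raise there (the 'none' arm is unreachable).
def hard_trimming (sequence : String) (qualList : List Int) (qs : Int) (len_s : Int) : Option String × Option (List Int) :=
  let l := qualList.filter (fun x => decide (x < qs))
  let p : String × List Int :=
    match l with
    | [] => (sequence, qualList)
    | x :: _ =>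
      match PySem.List.index? qualList x with
      | some i => (PySem.Str.slice sequence none (some (i : Int)), PySem.List.slice qualList none (some (i : Int)))
      | none => (sequence, qualList)  -- unreachable: l[0] ∈ qualList
  if (p.1.length : Int) < len_s then (none, none) else (some p.1, some p.2)

-- ===== PORT B =====
-- B's for-loop with the 'kept' accumulator and the break: structural recursion returning (kept, trimmed).
def hardTrimKeep (qs : Int) : List Int → List Int × Bool
  | [] => ([], false)
  | q :: rest =>
    if q < qs then ([], true)
    else
      let r := hardTrimKeep qs rest
      (q :: r.1, r.2)

-- B: sequence[:len(kept)] with len(kept) ≥ 0 is exactly 'take'.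
def hard_trimming_alt (sequence : String) (qualList : List Int) (qs : Int) (len_s : Int) : Option String × Option (List Int) :=
  let r := hardTrimKeep qs qualList
  let p : String × List Int :=
    if r.2 then (String.ofList (sequence.toList.take r.1.length), r.1)
    else (sequence, qualList)
  if (p.1.length : Int) < len_s then (none, none) else (some p.1, some p.2)

-- ===== PRECONDITION & SPEC =====
def Spec_hard_trimming (sequence : String) (qualList : List Int) (qs : Int) (len_s : Int) (out : Option String × Option (List Int)) : Prop := out = hard_trimming_alt sequence qualList qs len_s
instance (sequence : String) (qualList : List Int) (qs : Int) (len_s : Int) (out : Option String × Option (List Int)) : Decidable (Spec_hard_trimming sequence qualList qs len_s out) := by unfold Spec_hard_trimming; infer_instance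

-- ===== CLAIM (what is proved, stated in full; the proofs are below) =====
def Claim_equal_hard_trimming : Prop := ∀ (sequence : String) (qualList : List Int) (qs : Int) (len_s : Int), Dom_hard_trimming sequence qualList qs len_s → Spec_hard_trimming sequence qualList qs len_s (hard_trimming sequence qualList qs len_s)

-- ===== LEMMAS AND PROOFS =====

-- No bad quality: the loop never breaks.
theorem hardTrimKeep_of_filter_nil (qs : Int) (l : List Int)
    (h : l.filter (fun x => decide (x < qs)) = []) : (hardTrimKeep qs l).2 = false := by
  induction l with
  | nil => rfl
  | cons a t ih =>
    by_cases ha : a < qs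
    · simp [ha] at h
    · rw [List.filter_cons_of_neg (by simpa using ha)] at h
      simp [hardTrimKeep, ha, ih h]

-- Some bad quality x first in the filtered list: the loop breaks, its accumulator is
-- exactly the prefix qualList[:i] where i = qualList.index(x), and i = len(kept).
theorem hardTrimKeep_of_filter_cons (qs : Int) : ∀ (l : List Int) (x : Int) (xs : List Int),
    l.filter (fun x => decide (x < qs)) = x :: xs →
    (hardTrimKeep qs l).2 = true ∧
    PySem.List.index? l x = some (hardTrimKeep qs l).1.length ∧
    l.take (hardTrimKeep qs l).1.length = (hardTrimKeep qs l).1 := by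
  intro l
  induction l with
  | nil => intro x xs h; simp at h
  | cons a t ih =>
    intro x xs h
    by_cases ha : a < qs
    · rw [List.filter_cons_of_pos (by simpa using ha)] at h
      injection h with h1 _
      subst h1
      refine ⟨by simp [hardTrimKeep, ha], ?_, by simp [hardTrimKeep, ha]⟩
      have h0 : (hardTrimKeep qs (a :: t)).1 = [] := by simp [hardTrimKeep, ha]
      rw [h0]
      simp [List.idxOf?, List.findIdx?_cons]
    · rw [List.filter_cons_of_neg (by simpa using ha)] at h
      have hx : x < qs := by
        have : x ∈ t.filter (fun x => decide (x < qs)) := h ▸ List.mem_cons_self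
        simpa using List.of_mem_filter this
      have hne : a ≠ x := fun e => ha (e ▸ hx)
      obtain ⟨ht, hidx, htake⟩ := ih x xs h
      refine ⟨by simp [hardTrimKeep, ha, ht], ?_, ?_⟩
      · rw [PySem.List.index?_cons_of_ne t hne, hidx]
        simp [hardTrimKeep, ha]
      · simp [hardTrimKeep, ha, htake]

-- Python's slices [:i] for a natural i are 'take i'.
theorem strSlice_take (s : String) (i : Nat) :
    PySem.Str.slice s none (some (i : Int)) = String.ofList (s.toList.take i) := by
  apply String.ext
  simp [PySem.List.slice_to_natCast]

theorem listSlice_take (l : List Int) (i : Nat) :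
    PySem.List.slice l none (some (i : Int)) = l.take i := by
  simp [PySem.List.slice_to_natCast]

-- ===== VERDICT (by name: the statement is the Claim_ definition above) =====
theorem hard_trimming_spec : Claim_equal_hard_trimming := by
  intro sequence qualList qs len_s _
  unfold Spec_hard_trimming hard_trimming hard_trimming_alt
  cases hf : qualList.filter (fun x => decide (x < qs)) with
  | nil =>
    simp only [hardTrimKeep_of_filter_nil qs qualList hf, Bool.false_eq_true, if_false]
  | cons x xs =>
    obtain ⟨ht, hidx, htake⟩ := hardTrimKeep_of_filter_cons qs qualList x xs hf
    simp only [ht, hidx, if_true, strSlice_take, listSlice_take, htake]
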